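-- pv_equiv track=rewrite | github.com/docflowGM/foundryvtt-swse | tools/manual_phase7_soldier_prc_curation.py | category_specific
-- ===== SOURCE A (Python) =====
-- COMMON = {
--     'Soldier':['soldier','martial'],
--     'Elite Trooper':['elite_trooper','martial','prestige_class'],
--     'Ace Pilot':['ace_pilot','prestige_class','pilot','vehicle','starship'],
--     'Officer':['officer','leader','prestige_class'],
--     'Bounty Hunter':['bounty_hunter','prestige_class','tracker'],
--     'Gunslinger':['gunslinger','prestige_class','offense_ranged'],
--     'Crime Lord':['crime_lord','prestige_class','leader','social'],
--     'Master Privateer':['master_privateer','prestige_class','vehicle','starship','piracy'],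
--     'Saboteur':['saboteur','prestige_class','tech','demolitions'],
--     'Military Engineer':['military_engineer','prestige_class','tech'],
--     'Melee Duelist':['melee_duelist','prestige_class','duelist','offense_melee'],
--     'Gladiator':['gladiator','prestige_class','offense_melee','showman'],
--     'Infiltrator':['infiltrator','prestige_class','stealth'],
-- }
--
-- def add(tags,*vals):
--     for v in vals:
--         if v and v not in tags:
--             tags.append(v)
--
-- def category_specific(category,name,text):
--     lower=(name+' '+text).lower()
--     t=list(COMMON[category])
--     if category=='Elite Trooper':
--         if any(k in lower for k in ['armor','guard','take the hit','lifesaver','ward','shoulder to shoulder']): add(t,'defense','protector','ally_support')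
--         if any(k in lower for k in ['burst','attack','critical','yield','ignore armor','whirling death']): add(t,'offense_melee' if 'melee' in lower else 'offense_ranged','burst_damage')
--         if any(k in lower for k in ['mandalorian']): add(t,'mandalorian','mobility' if 'advance' in lower else 'durability')
--         if any(k in lower for k in ['reload','weapon shift','multiattack','weapon focus','specialization']): add(t,'action_economy','weapon_mastery')
--     elif category=='Ace Pilot':
--         add(t,'skill_pilot','vehicle_combat','dogfight')
--         if any(k in lower for k in ['evasion','juke','small target','blind spot','close scrape','close cover']): add(t,'defense','mobility')
--         if any(k in lower for k in ['attack run','gunner','great shot','all fire','hit','trigger','system hit','punch through']): add(t,'offense_ranged','accuracy','burst_damage')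
--         if any(k in lower for k in ['escort','wingman','squadron','regroup','interference']): add(t,'ally_support','teamwork','leader')
--         if any(k in lower for k in ['outrun','lose pursuit','relentless pursuit','full throttle']): add(t,'mobility','chase')
--     elif category=='Officer':
--         add(t,'ally_support','teamwork','command')
--         if any(k in lower for k in ['tactics','edge','deployment','outmaneuver']): add(t,'leader','battlefield_control','setup')
--         if any(k in lower for k in ['withdrawal','stay in the fight','numbers','sacrifice']): add(t,'survivability','morale')
--         if any(k in lower for k in ['recruit','legendary commander','grand leader']): add(t,'resources','social')
--         if any(k in lower for k in ['fleet']): add(t,'starship','vehicle','leader')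
--     elif category=='Bounty Hunter':
--         add(t,'pursuit','single_target')
--         if any(k in lower for k in ['mark','target','tag','findsman','visions','foresight','omens']): add(t,'tracking','skill_survival','skill_perception','setup')
--         if any(k in lower for k in ['fear','notorious','negotiator']): add(t,'social_control','fear','skill_persuasion')
--         if any(k in lower for k in ['jedi hunter','force blank','telekinetic resistance','lightsaber evasion']): add(t,'anti_force','defense')
--         if any(k in lower for k in ['precision fire','relentless']): add(t,'offense_ranged','precision_damage')
--     elif category=='Gunslinger':
--         add(t,'weapon_pistol','weapon_rifle','accuracy')
--         if any(k in lower for k in ['shot','fire','draw','trigger','blast','hailfire','twin shot']): add(t,'offense_ranged')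
--         if any(k in lower for k in ['quick draw','shoot from the hip','snap shot','opportunity fire']): add(t,'action_economy','reaction')
--         if any(k in lower for k in ['disarm','knockdown','debilitating','flank','deceptive']): add(t,'control','setup')
--         if any(k in lower for k in ['mobile','dash']): add(t,'mobility','hit_and_run')
--     elif category=='Crime Lord':
--         add(t,'ally_support','social_control','fear')
--         if any(k in lower for k in ['bodyguard','tactical withdrawal','tactical superiority']): add(t,'protector','teamwork')
--         if any(k in lower for k in ['inspire','frighten','terrify','fear me']): add(t,'fear','morale')
--         if any(k in lower for k in ['ally','minion','wealth','shelter','notoriety']): add(t,'resources','followers')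
--         if any(k in lower for k in ['urgency','impel']): add(t,'action_economy','leader')
--     elif category=='Master Privateer':
--         add(t,'offense_ranged','offense_melee','boarding')
--         if any(k in lower for k in ['blade','boarder','alive']): add(t,'offense_melee','control')
--         if any(k in lower for k in ['spacer','ion','privateer']): add(t,'vehicle','starship')
--         if any(k in lower for k in ['frenzy','surge','bloodthirsty']): add(t,'burst_damage')
--         if any(k in lower for k in ['reputation','attract privateer']): add(t,'followers','social')
--     elif category=='Saboteur':
--         add(t,'tech','demolitions','battlefield_control')
--         if 'turret' in lower: add(t,'turret','new_action','setup')
--         if any(k in lower for k in ['explosion','mine','self-destruct']): add(t,'area_damage','offense_ranged')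
--         if any(k in lower for k in ['jammer']): add(t,'droid_control','tech_control')
--     elif category=='Military Engineer':
--         add(t,'tech','skill_mechanics')
--         if any(k in lower for k in ['explosive','breach','sabotage']): add(t,'demolitions','control')
--         if any(k in lower for k in ['droid','vehicular','modifications','repairs']): add(t,'vehicle','droid','support')
--         if any(k in lower for k in ['problem solver','tech savant']): add(t,'knowledge','skills')
--     elif category=='Melee Duelist':
--         add(t,'finesse','mobility')
--         if any(k in lower for k in ['flourish','elegance','advantageous','single weapon','dual weapon']): add(t,'duelist','style')
--         if any(k in lower for k in ['dirty tricks','out of nowhere']): add(t,'setup','stealth','control')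
--         if 'multiattack' in lower: add(t,'weapon_mastery','action_economy')
--     elif category=='Gladiator':
--         add(t,'fear','crowd_control')
--         if any(k in lower for k in ['brutal','vendetta','unstoppable']): add(t,'burst_damage','survivability')
--         if any(k in lower for k in ['lockdown','distracting','call out']): add(t,'control','marking')
--         if 'exotic' in lower: add(t,'weapon_exotic','weapon_mastery')
--     elif category=='Infiltrator':
--         add(t,'skill_stealth','setup','precision_damage')
--         if any(k in lower for k in ['concealed weapon','silent','creeping']): add(t,'stealth','ambush')
--         if any(k in lower for k in ['stun','takedown']): add(t,'control','single_target')
--         if 'always ready' in lower: add(t,'initiative','reaction')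
--     return t
-- ===== SOURCE B (Python) =====
-- # Data-driven rewrite: one table of (base tags, ordered keyword rules) per category
-- # replaces the if/elif chain; conditional tags are encoded as ('?', kw, then, else).
--
-- def _add(t, vals):
--     for v in vals:
--         if v and v not in t:
--             t.append(v)
--
-- TABLE = {
--     'Soldier': (['soldier','martial'], []),
--     'Elite Trooper': (['elite_trooper','martial','prestige_class'], [
--         (['armor','guard','take the hit','lifesaver','ward','shoulder to shoulder'], ['defense','protector','ally_support']),
--         (['burst','attack','critical','yield','ignore armor','whirling death'], [('?','melee','offense_melee','offense_ranged'),'burst_damage']),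
--         (['mandalorian'], ['mandalorian',('?','advance','mobility','durability')]),
--         (['reload','weapon shift','multiattack','weapon focus','specialization'], ['action_economy','weapon_mastery']),
--     ]),
--     'Ace Pilot': (['ace_pilot','prestige_class','pilot','vehicle','starship','skill_pilot','vehicle_combat','dogfight'], [
--         (['evasion','juke','small target','blind spot','close scrape','close cover'], ['defense','mobility']),
--         (['attack run','gunner','great shot','all fire','hit','trigger','system hit','punch through'], ['offense_ranged','accuracy','burst_damage']),
--         (['escort','wingman','squadron','regroup','interference'], ['ally_support','teamwork','leader']),
--         (['outrun','lose pursuit','relentless pursuit','full throttle'], ['mobility','chase']),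
--     ]),
--     'Officer': (['officer','leader','prestige_class','ally_support','teamwork','command'], [
--         (['tactics','edge','deployment','outmaneuver'], ['leader','battlefield_control','setup']),
--         (['withdrawal','stay in the fight','numbers','sacrifice'], ['survivability','morale']),
--         (['recruit','legendary commander','grand leader'], ['resources','social']),
--         (['fleet'], ['starship','vehicle','leader']),
--     ]),
--     'Bounty Hunter': (['bounty_hunter','prestige_class','tracker','pursuit','single_target'], [
--         (['mark','target','tag','findsman','visions','foresight','omens'], ['tracking','skill_survival','skill_perception','setup']),
--         (['fear','notorious','negotiator'], ['social_control','fear','skill_persuasion']),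
--         (['jedi hunter','force blank','telekinetic resistance','lightsaber evasion'], ['anti_force','defense']),
--         (['precision fire','relentless'], ['offense_ranged','precision_damage']),
--     ]),
--     'Gunslinger': (['gunslinger','prestige_class','offense_ranged','weapon_pistol','weapon_rifle','accuracy'], [
--         (['shot','fire','draw','trigger','blast','hailfire','twin shot'], ['offense_ranged']),
--         (['quick draw','shoot from the hip','snap shot','opportunity fire'], ['action_economy','reaction']),
--         (['disarm','knockdown','debilitating','flank','deceptive'], ['control','setup']),
--         (['mobile','dash'], ['mobility','hit_and_run']),
--     ]),
--     'Crime Lord': (['crime_lord','prestige_class','leader','social','ally_support','social_control','fear'], [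
--         (['bodyguard','tactical withdrawal','tactical superiority'], ['protector','teamwork']),
--         (['inspire','frighten','terrify','fear me'], ['fear','morale']),
--         (['ally','minion','wealth','shelter','notoriety'], ['resources','followers']),
--         (['urgency','impel'], ['action_economy','leader']),
--     ]),
--     'Master Privateer': (['master_privateer','prestige_class','vehicle','starship','piracy','offense_ranged','offense_melee','boarding'], [
--         (['blade','boarder','alive'], ['offense_melee','control']),
--         (['spacer','ion','privateer'], ['vehicle','starship']),
--         (['frenzy','surge','bloodthirsty'], ['burst_damage']),
--         (['reputation','attract privateer'], ['followers','social']),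
--     ]),
--     'Saboteur': (['saboteur','prestige_class','tech','demolitions','tech','demolitions','battlefield_control'], [
--         (['turret'], ['turret','new_action','setup']),
--         (['explosion','mine','self-destruct'], ['area_damage','offense_ranged']),
--         (['jammer'], ['droid_control','tech_control']),
--     ]),
--     'Military Engineer': (['military_engineer','prestige_class','tech','tech','skill_mechanics'], [
--         (['explosive','breach','sabotage'], ['demolitions','control']),
--         (['droid','vehicular','modifications','repairs'], ['vehicle','droid','support']),
--         (['problem solver','tech savant'], ['knowledge','skills']),
--     ]),
--     'Melee Duelist': (['melee_duelist','prestige_class','duelist','offense_melee','finesse','mobility'], [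
--         (['flourish','elegance','advantageous','single weapon','dual weapon'], ['duelist','style']),
--         (['dirty tricks','out of nowhere'], ['setup','stealth','control']),
--         (['multiattack'], ['weapon_mastery','action_economy']),
--     ]),
--     'Gladiator': (['gladiator','prestige_class','offense_melee','showman','fear','crowd_control'], [
--         (['brutal','vendetta','unstoppable'], ['burst_damage','survivability']),
--         (['lockdown','distracting','call out'], ['control','marking']),
--         (['exotic'], ['weapon_exotic','weapon_mastery']),
--     ]),
--     'Infiltrator': (['infiltrator','prestige_class','stealth','skill_stealth','setup','precision_damage'], [
--         (['concealed weapon','silent','creeping'], ['stealth','ambush']),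
--         (['stun','takedown'], ['control','single_target']),
--         (['always ready'], ['initiative','reaction']),
--     ]),
-- }
--
-- def category_specific(category, name, text):
--     lower = (name + ' ' + text).lower()
--     base, rules = TABLE[category]
--     t = []
--     _add(t, base)
--     for kws, specs in rules:
--         if any(k in lower for k in kws):
--             _add(t, [s if isinstance(s, str) else (s[2] if s[1] in lower else s[3]) for s in specs])
--     return t
-- ===== Notes on version B (the rewrite author's own statement) =====
-- stated objective: idiomatic
-- what changed: Replaces the 13-branch if/elif chain by a module-level table mapping each category to its base tags plus an ordered list of (keywords, tag-spec) rules, applied by one generic loop; conditional tags are data ('?', kw, then, else) instead of inline conditional expressions.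
import Mathlib
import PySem

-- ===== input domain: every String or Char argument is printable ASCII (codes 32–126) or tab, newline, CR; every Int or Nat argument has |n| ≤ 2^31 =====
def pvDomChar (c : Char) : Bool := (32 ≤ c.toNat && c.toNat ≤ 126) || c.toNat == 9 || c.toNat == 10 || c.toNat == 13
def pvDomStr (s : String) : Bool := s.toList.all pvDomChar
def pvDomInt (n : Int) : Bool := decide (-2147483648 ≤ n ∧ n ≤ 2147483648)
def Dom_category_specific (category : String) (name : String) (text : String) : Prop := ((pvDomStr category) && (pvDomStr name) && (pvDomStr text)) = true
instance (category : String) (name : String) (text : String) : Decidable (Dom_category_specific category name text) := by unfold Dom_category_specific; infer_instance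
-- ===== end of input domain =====

-- B replaces A's if/elif chain by a module-level table of (base tags, keyword rules) per
-- category, looped generically (objective: more idiomatic/data-driven; same cost).

-- ===== PORT A =====
-- add(tags, *vals): append each truthy val not already present
def pyAdd (tags : List String) (vals : List String) : List String :=
  vals.foldl (fun t v => if v ≠ "" ∧ v ∉ t then t ++ [v] else t) tags

def COMMON : PySem.Dict String (List String) := PySem.Dict.ofList [
  ("Soldier", ["soldier","martial"]),
  ("Elite Trooper", ["elite_trooper","martial","prestige_class"]),
  ("Ace Pilot", ["ace_pilot","prestige_class","pilot","vehicle","starship"]),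
  ("Officer", ["officer","leader","prestige_class"]),
  ("Bounty Hunter", ["bounty_hunter","prestige_class","tracker"]),
  ("Gunslinger", ["gunslinger","prestige_class","offense_ranged"]),
  ("Crime Lord", ["crime_lord","prestige_class","leader","social"]),
  ("Master Privateer", ["master_privateer","prestige_class","vehicle","starship","piracy"]),
  ("Saboteur", ["saboteur","prestige_class","tech","demolitions"]),
  ("Military Engineer", ["military_engineer","prestige_class","tech"]),
  ("Melee Duelist", ["melee_duelist","prestige_class","duelist","offense_melee"]),
  ("Gladiator", ["gladiator","prestige_class","offense_melee","showman"]),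
  ("Infiltrator", ["infiltrator","prestige_class","stealth"])]

-- any(k in lower for k in ks), with the one-keyword case reducing to the bare test
def anyIn : List String → String → Bool
  | [], _ => false
  | [k], lower => PySem.Str.isIn k lower
  | k :: ks, lower => PySem.Str.isIn k lower || anyIn ks lower

-- literal transliteration of A's if/elif chain (COMMON[category] raising KeyError is
-- excluded by Pre_; the port's default [] there is never claimed)
def category_specific (category : String) (name : String) (text : String) : List String :=
  let lower := PySem.Str.lower (name ++ " " ++ text)
  let t := (COMMON.get? category).getD []
  if category == "Elite Trooper" then
    let t := if anyIn ["armor","guard","take the hit","lifesaver","ward","shoulder to shoulder"] lower then pyAdd t ["defense","protector","ally_support"] else t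
    let t := if anyIn ["burst","attack","critical","yield","ignore armor","whirling death"] lower then pyAdd t [if PySem.Str.isIn "melee" lower then "offense_melee" else "offense_ranged","burst_damage"] else t
    let t := if anyIn ["mandalorian"] lower then pyAdd t ["mandalorian", if PySem.Str.isIn "advance" lower then "mobility" else "durability"] else t
    if anyIn ["reload","weapon shift","multiattack","weapon focus","specialization"] lower then pyAdd t ["action_economy","weapon_mastery"] else t
  else if category == "Ace Pilot" then
    let t := pyAdd t ["skill_pilot","vehicle_combat","dogfight"]
    let t := if anyIn ["evasion","juke","small target","blind spot","close scrape","close cover"] lower then pyAdd t ["defense","mobility"] else t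
    let t := if anyIn ["attack run","gunner","great shot","all fire","hit","trigger","system hit","punch through"] lower then pyAdd t ["offense_ranged","accuracy","burst_damage"] else t
    let t := if anyIn ["escort","wingman","squadron","regroup","interference"] lower then pyAdd t ["ally_support","teamwork","leader"] else t
    if anyIn ["outrun","lose pursuit","relentless pursuit","full throttle"] lower then pyAdd t ["mobility","chase"] else t
  else if category == "Officer" then
    let t := pyAdd t ["ally_support","teamwork","command"]
    let t := if anyIn ["tactics","edge","deployment","outmaneuver"] lower then pyAdd t ["leader","battlefield_control","setup"] else t
    let t := if anyIn ["withdrawal","stay in the fight","numbers","sacrifice"] lower then pyAdd t ["survivability","morale"] else t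
    let t := if anyIn ["recruit","legendary commander","grand leader"] lower then pyAdd t ["resources","social"] else t
    if anyIn ["fleet"] lower then pyAdd t ["starship","vehicle","leader"] else t
  else if category == "Bounty Hunter" then
    let t := pyAdd t ["pursuit","single_target"]
    let t := if anyIn ["mark","target","tag","findsman","visions","foresight","omens"] lower then pyAdd t ["tracking","skill_survival","skill_perception","setup"] else t
    let t := if anyIn ["fear","notorious","negotiator"] lower then pyAdd t ["social_control","fear","skill_persuasion"] else t
    let t := if anyIn ["jedi hunter","force blank","telekinetic resistance","lightsaber evasion"] lower then pyAdd t ["anti_force","defense"] else t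
    if anyIn ["precision fire","relentless"] lower then pyAdd t ["offense_ranged","precision_damage"] else t
  else if category == "Gunslinger" then
    let t := pyAdd t ["weapon_pistol","weapon_rifle","accuracy"]
    let t := if anyIn ["shot","fire","draw","trigger","blast","hailfire","twin shot"] lower then pyAdd t ["offense_ranged"] else t
    let t := if anyIn ["quick draw","shoot from the hip","snap shot","opportunity fire"] lower then pyAdd t ["action_economy","reaction"] else t
    let t := if anyIn ["disarm","knockdown","debilitating","flank","deceptive"] lower then pyAdd t ["control","setup"] else t
    if anyIn ["mobile","dash"] lower then pyAdd t ["mobility","hit_and_run"] else t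
  else if category == "Crime Lord" then
    let t := pyAdd t ["ally_support","social_control","fear"]
    let t := if anyIn ["bodyguard","tactical withdrawal","tactical superiority"] lower then pyAdd t ["protector","teamwork"] else t
    let t := if anyIn ["inspire","frighten","terrify","fear me"] lower then pyAdd t ["fear","morale"] else t
    let t := if anyIn ["ally","minion","wealth","shelter","notoriety"] lower then pyAdd t ["resources","followers"] else t
    if anyIn ["urgency","impel"] lower then pyAdd t ["action_economy","leader"] else t
  else if category == "Master Privateer" then
    let t := pyAdd t ["offense_ranged","offense_melee","boarding"]
    let t := if anyIn ["blade","boarder","alive"] lower then pyAdd t ["offense_melee","control"] else t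
    let t := if anyIn ["spacer","ion","privateer"] lower then pyAdd t ["vehicle","starship"] else t
    let t := if anyIn ["frenzy","surge","bloodthirsty"] lower then pyAdd t ["burst_damage"] else t
    if anyIn ["reputation","attract privateer"] lower then pyAdd t ["followers","social"] else t
  else if category == "Saboteur" then
    let t := pyAdd t ["tech","demolitions","battlefield_control"]
    let t := if PySem.Str.isIn "turret" lower then pyAdd t ["turret","new_action","setup"] else t
    let t := if anyIn ["explosion","mine","self-destruct"] lower then pyAdd t ["area_damage","offense_ranged"] else t
    if anyIn ["jammer"] lower then pyAdd t ["droid_control","tech_control"] else t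
  else if category == "Military Engineer" then
    let t := pyAdd t ["tech","skill_mechanics"]
    let t := if anyIn ["explosive","breach","sabotage"] lower then pyAdd t ["demolitions","control"] else t
    let t := if anyIn ["droid","vehicular","modifications","repairs"] lower then pyAdd t ["vehicle","droid","support"] else t
    if anyIn ["problem solver","tech savant"] lower then pyAdd t ["knowledge","skills"] else t
  else if category == "Melee Duelist" then
    let t := pyAdd t ["finesse","mobility"]
    let t := if anyIn ["flourish","elegance","advantageous","single weapon","dual weapon"] lower then pyAdd t ["duelist","style"] else t
    let t := if anyIn ["dirty tricks","out of nowhere"] lower then pyAdd t ["setup","stealth","control"] else t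
    if PySem.Str.isIn "multiattack" lower then pyAdd t ["weapon_mastery","action_economy"] else t
  else if category == "Gladiator" then
    let t := pyAdd t ["fear","crowd_control"]
    let t := if anyIn ["brutal","vendetta","unstoppable"] lower then pyAdd t ["burst_damage","survivability"] else t
    let t := if anyIn ["lockdown","distracting","call out"] lower then pyAdd t ["control","marking"] else t
    if PySem.Str.isIn "exotic" lower then pyAdd t ["weapon_exotic","weapon_mastery"] else t
  else if category == "Infiltrator" then
    let t := pyAdd t ["skill_stealth","setup","precision_damage"]
    let t := if anyIn ["concealed weapon","silent","creeping"] lower then pyAdd t ["stealth","ambush"] else t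
    let t := if anyIn ["stun","takedown"] lower then pyAdd t ["control","single_target"] else t
    if PySem.Str.isIn "always ready" lower then pyAdd t ["initiative","reaction"] else t
  else t

-- ===== PORT B =====
-- a tag spec: a fixed tag, or a tag chosen by whether a keyword occurs in `lower`
inductive TagSpec where
  | const : String → TagSpec
  | cond : String → String → String → TagSpec
deriving DecidableEq, Repr

def evalSpec (lower : String) : TagSpec → String
  | .const s => s
  | .cond kw a b => if PySem.Str.isIn kw lower then a else b

def TABLE : PySem.Dict String (List String × List (List String × List TagSpec)) := PySem.Dict.ofList [
  ("Soldier", (["soldier","martial"], [])),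
  ("Elite Trooper", (["elite_trooper","martial","prestige_class"], [
    (["armor","guard","take the hit","lifesaver","ward","shoulder to shoulder"], [.const "defense", .const "protector", .const "ally_support"]),
    (["burst","attack","critical","yield","ignore armor","whirling death"], [.cond "melee" "offense_melee" "offense_ranged", .const "burst_damage"]),
    (["mandalorian"], [.const "mandalorian", .cond "advance" "mobility" "durability"]),
    (["reload","weapon shift","multiattack","weapon focus","specialization"], [.const "action_economy", .const "weapon_mastery"])])),
  ("Ace Pilot", (["ace_pilot","prestige_class","pilot","vehicle","starship","skill_pilot","vehicle_combat","dogfight"], [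
    (["evasion","juke","small target","blind spot","close scrape","close cover"], [.const "defense", .const "mobility"]),
    (["attack run","gunner","great shot","all fire","hit","trigger","system hit","punch through"], [.const "offense_ranged", .const "accuracy", .const "burst_damage"]),
    (["escort","wingman","squadron","regroup","interference"], [.const "ally_support", .const "teamwork", .const "leader"]),
    (["outrun","lose pursuit","relentless pursuit","full throttle"], [.const "mobility", .const "chase"])])),
  ("Officer", (["officer","leader","prestige_class","ally_support","teamwork","command"], [
    (["tactics","edge","deployment","outmaneuver"], [.const "leader", .const "battlefield_control", .const "setup"]),
    (["withdrawal","stay in the fight","numbers","sacrifice"], [.const "survivability", .const "morale"]),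
    (["recruit","legendary commander","grand leader"], [.const "resources", .const "social"]),
    (["fleet"], [.const "starship", .const "vehicle", .const "leader"])])),
  ("Bounty Hunter", (["bounty_hunter","prestige_class","tracker","pursuit","single_target"], [
    (["mark","target","tag","findsman","visions","foresight","omens"], [.const "tracking", .const "skill_survival", .const "skill_perception", .const "setup"]),
    (["fear","notorious","negotiator"], [.const "social_control", .const "fear", .const "skill_persuasion"]),
    (["jedi hunter","force blank","telekinetic resistance","lightsaber evasion"], [.const "anti_force", .const "defense"]),
    (["precision fire","relentless"], [.const "offense_ranged", .const "precision_damage"])])),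
  ("Gunslinger", (["gunslinger","prestige_class","offense_ranged","weapon_pistol","weapon_rifle","accuracy"], [
    (["shot","fire","draw","trigger","blast","hailfire","twin shot"], [.const "offense_ranged"]),
    (["quick draw","shoot from the hip","snap shot","opportunity fire"], [.const "action_economy", .const "reaction"]),
    (["disarm","knockdown","debilitating","flank","deceptive"], [.const "control", .const "setup"]),
    (["mobile","dash"], [.const "mobility", .const "hit_and_run"])])),
  ("Crime Lord", (["crime_lord","prestige_class","leader","social","ally_support","social_control","fear"], [
    (["bodyguard","tactical withdrawal","tactical superiority"], [.const "protector", .const "teamwork"]),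
    (["inspire","frighten","terrify","fear me"], [.const "fear", .const "morale"]),
    (["ally","minion","wealth","shelter","notoriety"], [.const "resources", .const "followers"]),
    (["urgency","impel"], [.const "action_economy", .const "leader"])])),
  ("Master Privateer", (["master_privateer","prestige_class","vehicle","starship","piracy","offense_ranged","offense_melee","boarding"], [
    (["blade","boarder","alive"], [.const "offense_melee", .const "control"]),
    (["spacer","ion","privateer"], [.const "vehicle", .const "starship"]),
    (["frenzy","surge","bloodthirsty"], [.const "burst_damage"]),
    (["reputation","attract privateer"], [.const "followers", .const "social"])])),
  ("Saboteur", (["saboteur","prestige_class","tech","demolitions","tech","demolitions","battlefield_control"], [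
    (["turret"], [.const "turret", .const "new_action", .const "setup"]),
    (["explosion","mine","self-destruct"], [.const "area_damage", .const "offense_ranged"]),
    (["jammer"], [.const "droid_control", .const "tech_control"])])),
  ("Military Engineer", (["military_engineer","prestige_class","tech","tech","skill_mechanics"], [
    (["explosive","breach","sabotage"], [.const "demolitions", .const "control"]),
    (["droid","vehicular","modifications","repairs"], [.const "vehicle", .const "droid", .const "support"]),
    (["problem solver","tech savant"], [.const "knowledge", .const "skills"])])),
  ("Melee Duelist", (["melee_duelist","prestige_class","duelist","offense_melee","finesse","mobility"], [
    (["flourish","elegance","advantageous","single weapon","dual weapon"], [.const "duelist", .const "style"]),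
    (["dirty tricks","out of nowhere"], [.const "setup", .const "stealth", .const "control"]),
    (["multiattack"], [.const "weapon_mastery", .const "action_economy"])])),
  ("Gladiator", (["gladiator","prestige_class","offense_melee","showman","fear","crowd_control"], [
    (["brutal","vendetta","unstoppable"], [.const "burst_damage", .const "survivability"]),
    (["lockdown","distracting","call out"], [.const "control", .const "marking"]),
    (["exotic"], [.const "weapon_exotic", .const "weapon_mastery"])])),
  ("Infiltrator", (["infiltrator","prestige_class","stealth","skill_stealth","setup","precision_damage"], [
    (["concealed weapon","silent","creeping"], [.const "stealth", .const "ambush"]),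
    (["stun","takedown"], [.const "control", .const "single_target"]),
    (["always ready"], [.const "initiative", .const "reaction"])]))]

def category_specific_alt (category : String) (name : String) (text : String) : List String :=
  let lower := PySem.Str.lower (name ++ " " ++ text)
  match TABLE.get? category with
  | none => []
  | some (base, rules) =>
    rules.foldl
      (fun t r =>
        if anyIn r.1 lower then pyAdd t (r.2.map (evalSpec lower)) else t)
      (pyAdd [] base)

-- ===== PRECONDITION & SPEC =====
-- Pre_ excludes exactly the categories absent from COMMON, where Python A raises KeyError.
def Pre_category_specific (category : String) (name : String) (text : String) : Prop :=
  category ∈ ["Soldier","Elite Trooper","Ace Pilot","Officer","Bounty Hunter","Gunslinger",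
    "Crime Lord","Master Privateer","Saboteur","Military Engineer","Melee Duelist","Gladiator","Infiltrator"]
instance (category : String) (name : String) (text : String) : Decidable (Pre_category_specific category name text) := by unfold Pre_category_specific; infer_instance

def pvWitness_category_specific : String × String × String := ("Gladiator", "Brutal Champion", "exotic lockdown")

def Spec_category_specific (category : String) (name : String) (text : String) (out : List String) : Prop := out = category_specific_alt category name text
instance (category : String) (name : String) (text : String) (out : List String) : Decidable (Spec_category_specific category name text out) := by unfold Spec_category_specific; infer_instance

-- ===== CLAIM (what is proved, stated in full; the proofs are below) =====
def Claim_equal_category_specific : Prop := ∀ (category : String) (name : String) (text : String), Dom_category_specific category name text → Pre_category_specific category name text → Spec_category_specific category name text (category_specific category name text)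

-- ===== LEMMAS AND PROOFS =====
-- one definitional-equality lemma per category (A's branch = B's table row)

theorem br_soldier (name text : String) : category_specific "Soldier" name text = category_specific_alt "Soldier" name text := by rfl
theorem br_elite_trooper (name text : String) : category_specific "Elite Trooper" name text = category_specific_alt "Elite Trooper" name text := by rfl
theorem br_ace_pilot (name text : String) : category_specific "Ace Pilot" name text = category_specific_alt "Ace Pilot" name text := by rfl
theorem br_officer (name text : String) : category_specific "Officer" name text = category_specific_alt "Officer" name text := by rfl
theorem br_bounty_hunter (name text : String) : category_specific "Bounty Hunter" name text = category_specific_alt "Bounty Hunter" name text := by rfl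
theorem br_gunslinger (name text : String) : category_specific "Gunslinger" name text = category_specific_alt "Gunslinger" name text := by rfl
theorem br_crime_lord (name text : String) : category_specific "Crime Lord" name text = category_specific_alt "Crime Lord" name text := by rfl
theorem br_master_privateer (name text : String) : category_specific "Master Privateer" name text = category_specific_alt "Master Privateer" name text := by rfl
theorem br_saboteur (name text : String) : category_specific "Saboteur" name text = category_specific_alt "Saboteur" name text := by rfl
theorem br_military_engineer (name text : String) : category_specific "Military Engineer" name text = category_specific_alt "Military Engineer" name text := by rfl
theorem br_melee_duelist (name text : String) : category_specific "Melee Duelist" name text = category_specific_alt "Melee Duelist" name text := by rfl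
theorem br_gladiator (name text : String) : category_specific "Gladiator" name text = category_specific_alt "Gladiator" name text := by rfl
theorem br_infiltrator (name text : String) : category_specific "Infiltrator" name text = category_specific_alt "Infiltrator" name text := by rfl

-- ===== VERDICT (by name: the statement is the Claim_ definition above) =====
theorem category_specific_spec : Claim_equal_category_specific := by
  intro category name text _ hpre
  unfold Spec_category_specific
  unfold Pre_category_specific at hpre
  simp only [List.mem_cons, List.not_mem_nil, or_false] at hpre
  rcases hpre with h|h|h|h|h|h|h|h|h|h|h|h|h <;> subst h
  exacts [br_soldier name text, br_elite_trooper name text, br_ace_pilot name text, br_officer name text, br_bounty_hunter name text, br_gunslinger name text, br_crime_lord name text, br_master_privateer name text, br_saboteur name text, br_military_engineer name text, br_melee_duelist name text, br_gladiator name text, br_infiltrator name text]
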